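-- pv_equiv track=rewrite | github.com/mathishard/cribbage | makelookups.py | fifteens
-- ===== SOURCE A (Python) =====
-- def fifteens(chand,cut):
--     fiftscore=0
--     vals = []
--     for i in range(0,len(chand)):
--         vals.append(chand[i][1])
--     vals.append(cut[0][1])
--     for i in range (0,4):
--         for j in range (i+1,5):
--             if vals[i]+vals[j]==15:
--                 fiftscore+=2
--     for i in range (0,3):
--         for j in range (i+1,4):
--             for k in range (j+1,5):
--                 if vals[i]+vals[j]+vals[k]==15:
--                     fiftscore+=2
--     for i in range (0,2):
--         for j in range (i+1,3):
--             for k in range (j+1,4):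
--                 for l in range (k+1,5):
--                     if vals[i]+vals[j]+vals[k]+vals[l]==15:
--                         fiftscore+=2
--     if vals[0]+vals[1]+vals[2]+vals[3]+vals[4]==15:
--         fiftscore+=2
--     return fiftscore
-- ===== SOURCE B (Python) =====
-- def fifteens(chand, cut):
--     vals = [row[1] for row in chand]
--     vals.append(cut[0][1])
--     five = vals[:5]
--
--     def count(i, s):
--         # number of subsets of five[i:] whose values together with s sum to 15
--         if i == len(five):
--             return 1 if s == 15 else 0
--         return count(i + 1, s) + count(i + 1, s + five[i])
--
--     singles = sum(1 for v in five if v == 15)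
--     return 2 * (count(0, 0) - singles)
-- ===== Notes on version B (the rewrite author's own statement) =====
-- stated objective: alternative
-- what changed: Replaced A's four hand-unrolled nested index-loop nests enumerating pairs/triples/quadruples/quintuple by an include-exclude subset-sum recursion over the five values (counting ALL subsets summing to 15, then subtracting the singleton hits, which a 2..5-card count must not include), returning twice that count.
import Mathlib
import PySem

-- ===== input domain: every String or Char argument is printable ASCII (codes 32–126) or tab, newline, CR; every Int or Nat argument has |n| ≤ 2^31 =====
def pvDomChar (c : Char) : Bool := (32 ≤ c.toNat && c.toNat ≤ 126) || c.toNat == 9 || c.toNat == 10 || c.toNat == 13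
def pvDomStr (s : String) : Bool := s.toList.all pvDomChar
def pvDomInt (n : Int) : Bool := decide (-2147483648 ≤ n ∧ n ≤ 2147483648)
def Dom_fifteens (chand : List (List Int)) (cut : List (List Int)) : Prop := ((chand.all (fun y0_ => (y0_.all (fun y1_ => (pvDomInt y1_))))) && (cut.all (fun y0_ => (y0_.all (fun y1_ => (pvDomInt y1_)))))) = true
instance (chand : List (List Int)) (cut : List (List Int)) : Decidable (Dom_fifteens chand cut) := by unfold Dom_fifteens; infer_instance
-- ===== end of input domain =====

-- B replaces A's four hand-unrolled nested index-loop nests by an include/exclude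
-- subset-sum recursion over the five values (count all subsets summing to 15, subtract
-- the singleton hits, double); objective: alternative decomposition.

-- ===== PORT A =====
def fifteens (chand : List (List Int)) (cut : List (List Int)) : Int :=
  let vals0 : List Int :=
    List.foldl (fun acc i => acc ++ [PySem.List.pyGetD (PySem.List.pyGetD chand i []) 1 0])
      [] (PySem.List.pyRange 0 (PySem.List.len chand))
  let vals := vals0 ++ [PySem.List.pyGetD (PySem.List.pyGetD cut 0 []) 1 0]
  let s1 : Int :=
    List.foldl (fun acc i =>
      List.foldl (fun acc j =>
        if PySem.List.pyGetD vals i 0 + PySem.List.pyGetD vals j 0 = 15 then acc + 2 else acc)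
        acc (PySem.List.pyRange (i+1) 5)) 0 (PySem.List.pyRange 0 4)
  let s2 : Int :=
    List.foldl (fun acc i =>
      List.foldl (fun acc j =>
        List.foldl (fun acc k =>
          if PySem.List.pyGetD vals i 0 + PySem.List.pyGetD vals j 0 + PySem.List.pyGetD vals k 0 = 15 then acc + 2 else acc)
          acc (PySem.List.pyRange (j+1) 5))
        acc (PySem.List.pyRange (i+1) 4)) s1 (PySem.List.pyRange 0 3)
  let s3 : Int :=
    List.foldl (fun acc i =>
      List.foldl (fun acc j =>
        List.foldl (fun acc k =>
          List.foldl (fun acc l =>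
            if PySem.List.pyGetD vals i 0 + PySem.List.pyGetD vals j 0 + PySem.List.pyGetD vals k 0 + PySem.List.pyGetD vals l 0 = 15 then acc + 2 else acc)
            acc (PySem.List.pyRange (k+1) 5))
          acc (PySem.List.pyRange (j+1) 4))
        acc (PySem.List.pyRange (i+1) 3)) s2 (PySem.List.pyRange 0 2)
  if PySem.List.pyGetD vals 0 0 + PySem.List.pyGetD vals 1 0 + PySem.List.pyGetD vals 2 0
      + PySem.List.pyGetD vals 3 0 + PySem.List.pyGetD vals 4 0 = 15 then s3 + 2 else s3

-- ===== PORT B =====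
-- count i s in Source B: structural recursion over the remaining values, accumulating s
def fifteensCount : List Int → Int → Int
  | [], s => if s = 15 then 1 else 0
  | v :: rest, s => fifteensCount rest s + fifteensCount rest (s + v)

def fifteens_alt (chand : List (List Int)) (cut : List (List Int)) : Int :=
  let vals : List Int :=
    chand.map (fun row => PySem.List.pyGetD row 1 0)
      ++ [PySem.List.pyGetD (PySem.List.pyGetD cut 0 []) 1 0]
  let five := PySem.List.slice vals none (some 5)
  let singles : Int := five.foldl (fun acc v => if v = 15 then acc + 1 else acc) 0
  2 * (fifteensCount five 0 - singles)

-- ===== PRECONDITION & SPEC =====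
-- Pre_ excludes exactly the inputs on which the Python A raises an IndexError:
-- fewer than four rows in chand (vals[4] would be out of range), a chand row without a
-- second entry, an empty cut, or a first cut row without a second entry.
def Pre_fifteens (chand : List (List Int)) (cut : List (List Int)) : Prop :=
  4 ≤ chand.length ∧ (∀ row ∈ chand, 2 ≤ row.length) ∧ 1 ≤ cut.length ∧ 2 ≤ (cut.headD []).length
instance (chand : List (List Int)) (cut : List (List Int)) : Decidable (Pre_fifteens chand cut) := by unfold Pre_fifteens; infer_instance

def pvWitness_fifteens : List (List Int) × List (List Int) :=
  ([[0, 5], [1, 5], [2, 10], [3, 4]], [[4, 1]])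

def Spec_fifteens (chand : List (List Int)) (cut : List (List Int)) (out : Int) : Prop := out = fifteens_alt chand cut
instance (chand : List (List Int)) (cut : List (List Int)) (out : Int) : Decidable (Spec_fifteens chand cut out) := by unfold Spec_fifteens; infer_instance

-- ===== CLAIM (what is proved, stated in full; the proofs are below) =====
def Claim_equal_fifteens : Prop := ∀ (chand : List (List Int)) (cut : List (List Int)), Dom_fifteens chand cut → Pre_fifteens chand cut → Spec_fifteens chand cut (fifteens chand cut)

-- ===== LEMMAS AND PROOFS =====

theorem pv_ite_acc (c : Prop) [Decidable c] (x : Int) :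
    (if c then x + 2 else x) = x + (if c then 2 else 0) := by
  split_ifs <;> simp

theorem pv_ite_acc1 (c : Prop) [Decidable c] (x : Int) :
    (if c then x + 1 else x) = x + (if c then 1 else 0) := by
  split_ifs <;> simp

theorem pv_two_ind (c : Prop) [Decidable c] :
    (if c then (2:Int) else 0) = 2 * (if c then 1 else 0) := by
  split_ifs <;> ring

theorem pv_foldl_ite {α : Type} (p : α → Prop) [DecidablePred p] (l : List α) (a : Int) :
    List.foldl (fun acc x => if p x then acc + 2 else acc) a l
      = a + (l.map (fun x => if p x then (2:Int) else 0)).sum := by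
  induction l generalizing a with
  | nil => simp
  | cons x t ih => by_cases h : p x <;> simp [List.foldl_cons, h, ih, add_assoc]

-- loop over indices 0..len-1 appending chand[i][1] = map of row ↦ row[1]
theorem pv_vals_eq (chand : List (List Int)) :
    List.foldl (fun acc i => acc ++ [PySem.List.pyGetD (PySem.List.pyGetD chand i []) 1 0])
      [] (PySem.List.pyRange 0 (PySem.List.len chand))
    = chand.map (fun row => PySem.List.pyGetD row 1 0) := by
  rw [PySem.List.foldl_append_singleton_eq_map,
    show (fun i => PySem.List.pyGetD (PySem.List.pyGetD chand i []) 1 0)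
      = ((fun row => PySem.List.pyGetD row 1 0) ∘ (fun i : Int => PySem.List.pyGetD chand i [])) from rfl,
    ← List.map_map, PySem.List.map_pyGetD_pyRange_zero, List.nil_append]

-- the common core: both programs as a function of the first five values
set_option maxHeartbeats 1000000 in
theorem pv_core (v0 v1 v2 v3 v4 : Int) (tail : List Int) :
    (if PySem.List.pyGetD (v0 :: v1 :: v2 :: v3 :: v4 :: tail) 0 0 + PySem.List.pyGetD (v0 :: v1 :: v2 :: v3 :: v4 :: tail) 1 0 + PySem.List.pyGetD (v0 :: v1 :: v2 :: v3 :: v4 :: tail) 2 0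
       + PySem.List.pyGetD (v0 :: v1 :: v2 :: v3 :: v4 :: tail) 3 0 + PySem.List.pyGetD (v0 :: v1 :: v2 :: v3 :: v4 :: tail) 4 0 = 15 then (List.foldl (fun acc i =>
       List.foldl (fun acc j =>
         List.foldl (fun acc k =>
           List.foldl (fun acc l =>
             if PySem.List.pyGetD (v0 :: v1 :: v2 :: v3 :: v4 :: tail) i 0 + PySem.List.pyGetD (v0 :: v1 :: v2 :: v3 :: v4 :: tail) j 0 + PySem.List.pyGetD (v0 :: v1 :: v2 :: v3 :: v4 :: tail) k 0 + PySem.List.pyGetD (v0 :: v1 :: v2 :: v3 :: v4 :: tail) l 0 = 15 then acc + 2 else acc)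
             acc (PySem.List.pyRange (k+1) 5))
           acc (PySem.List.pyRange (j+1) 4))
         acc (PySem.List.pyRange (i+1) 3)) (List.foldl (fun acc i =>
       List.foldl (fun acc j =>
         List.foldl (fun acc k =>
           if PySem.List.pyGetD (v0 :: v1 :: v2 :: v3 :: v4 :: tail) i 0 + PySem.List.pyGetD (v0 :: v1 :: v2 :: v3 :: v4 :: tail) j 0 + PySem.List.pyGetD (v0 :: v1 :: v2 :: v3 :: v4 :: tail) k 0 = 15 then acc + 2 else acc)
           acc (PySem.List.pyRange (j+1) 5))
         acc (PySem.List.pyRange (i+1) 4)) (List.foldl (fun acc i =>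
       List.foldl (fun acc j =>
         if PySem.List.pyGetD (v0 :: v1 :: v2 :: v3 :: v4 :: tail) i 0 + PySem.List.pyGetD (v0 :: v1 :: v2 :: v3 :: v4 :: tail) j 0 = 15 then acc + 2 else acc)
         acc (PySem.List.pyRange (i+1) 5)) (0 : Int) (PySem.List.pyRange 0 4)) (PySem.List.pyRange 0 3)) (PySem.List.pyRange 0 2)) + 2 else (List.foldl (fun acc i =>
       List.foldl (fun acc j =>
         List.foldl (fun acc k =>
           List.foldl (fun acc l =>
             if PySem.List.pyGetD (v0 :: v1 :: v2 :: v3 :: v4 :: tail) i 0 + PySem.List.pyGetD (v0 :: v1 :: v2 :: v3 :: v4 :: tail) j 0 + PySem.List.pyGetD (v0 :: v1 :: v2 :: v3 :: v4 :: tail) k 0 + PySem.List.pyGetD (v0 :: v1 :: v2 :: v3 :: v4 :: tail) l 0 = 15 then acc + 2 else acc)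
             acc (PySem.List.pyRange (k+1) 5))
           acc (PySem.List.pyRange (j+1) 4))
         acc (PySem.List.pyRange (i+1) 3)) (List.foldl (fun acc i =>
       List.foldl (fun acc j =>
         List.foldl (fun acc k =>
           if PySem.List.pyGetD (v0 :: v1 :: v2 :: v3 :: v4 :: tail) i 0 + PySem.List.pyGetD (v0 :: v1 :: v2 :: v3 :: v4 :: tail) j 0 + PySem.List.pyGetD (v0 :: v1 :: v2 :: v3 :: v4 :: tail) k 0 = 15 then acc + 2 else acc)
           acc (PySem.List.pyRange (j+1) 5))
         acc (PySem.List.pyRange (i+1) 4)) (List.foldl (fun acc i =>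
       List.foldl (fun acc j =>
         if PySem.List.pyGetD (v0 :: v1 :: v2 :: v3 :: v4 :: tail) i 0 + PySem.List.pyGetD (v0 :: v1 :: v2 :: v3 :: v4 :: tail) j 0 = 15 then acc + 2 else acc)
         acc (PySem.List.pyRange (i+1) 5)) (0 : Int) (PySem.List.pyRange 0 4)) (PySem.List.pyRange 0 3)) (PySem.List.pyRange 0 2)))
    = 2 * (fifteensCount [v0, v1, v2, v3, v4] 0
        - List.foldl (fun acc v => if v = 15 then acc + 1 else acc) 0 [v0, v1, v2, v3, v4]) := by
  simp only [pv_foldl_ite, PySem.List.foldl_add]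
  simp only [show PySem.List.pyRange 0 4 = [0,1,2,3] from by decide,
    show PySem.List.pyRange 0 3 = [0,1,2] from by decide,
    show PySem.List.pyRange 0 2 = [0,1] from by decide,
    List.map_cons, List.map_nil, List.sum_cons, List.sum_nil,
    show (0:Int)+1 = 1 from by decide, show (1:Int)+1 = 2 from by decide,
    show (2:Int)+1 = 3 from by decide, show (3:Int)+1 = 4 from by decide,
    show PySem.List.pyRange 1 5 = [1,2,3,4] from by decide,
    show PySem.List.pyRange 2 5 = [2,3,4] from by decide,
    show PySem.List.pyRange 3 5 = [3,4] from by decide,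
    show PySem.List.pyRange 4 5 = [4] from by decide,
    show PySem.List.pyRange 1 4 = [1,2,3] from by decide,
    show PySem.List.pyRange 2 4 = [2,3] from by decide,
    show PySem.List.pyRange 3 4 = [3] from by decide,
    show PySem.List.pyRange 1 3 = [1,2] from by decide,
    show PySem.List.pyRange 2 3 = [2] from by decide,
    PySem.List.pyGetD_ofNat', List.getD_cons_zero, List.getD_cons_succ,
    fifteensCount, List.foldl_cons, List.foldl_nil, zero_add]
  simp only [pv_ite_acc, pv_ite_acc1, zero_add,
    show (if (0:Int) = 15 then (1:Int) else 0) = 0 from by decide]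
  simp only [pv_two_ind]
  simp only [add_assoc]
  ring

-- ===== VERDICT (by name: the statement is the Claim_ definition above) =====
set_option maxHeartbeats 4000000 in
theorem fifteens_spec : Claim_equal_fifteens := by
  intro chand cut _ hpre
  obtain ⟨hlen, hrows, hcut, hcut2⟩ := hpre
  rcases cut with _ | ⟨c0, crest⟩
  · simp at hcut
  rcases chand with _ | ⟨a, _ | ⟨b, _ | ⟨c, _ | ⟨d, rest⟩⟩⟩⟩ <;> simp [List.length] at hlen
  unfold Spec_fifteens fifteens fifteens_alt
  rw [pv_vals_eq]
  simp only [show PySem.List.pyGetD (c0 :: crest) 0 ([] : List Int) = c0 from by simp, List.map_cons, List.cons_append]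
  rcases rest with _ | ⟨r, rs⟩
  · simp only [List.map_nil, List.nil_append]
    rw [show PySem.List.slice [PySem.List.pyGetD a 1 0, PySem.List.pyGetD b 1 0,
        PySem.List.pyGetD c 1 0, PySem.List.pyGetD d 1 0, PySem.List.pyGetD c0 1 0]
        none (some 5) = [PySem.List.pyGetD a 1 0, PySem.List.pyGetD b 1 0,
        PySem.List.pyGetD c 1 0, PySem.List.pyGetD d 1 0, PySem.List.pyGetD c0 1 0] from
      (PySem.List.slice_to _ (by norm_num)).trans rfl]
    exact pv_core _ _ _ _ _ []
  · simp only [List.map_cons, List.cons_append]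
    rw [show PySem.List.slice (PySem.List.pyGetD a 1 0 :: PySem.List.pyGetD b 1 0 ::
        PySem.List.pyGetD c 1 0 :: PySem.List.pyGetD d 1 0 :: PySem.List.pyGetD r 1 0 ::
        (rs.map (fun row => PySem.List.pyGetD row 1 0) ++ [PySem.List.pyGetD c0 1 0]))
        none (some 5) = [PySem.List.pyGetD a 1 0, PySem.List.pyGetD b 1 0,
        PySem.List.pyGetD c 1 0, PySem.List.pyGetD d 1 0, PySem.List.pyGetD r 1 0] from
      (PySem.List.slice_to _ (by norm_num)).trans rfl]
    exact pv_core (PySem.List.pyGetD a 1 0) (PySem.List.pyGetD b 1 0)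
      (PySem.List.pyGetD c 1 0) (PySem.List.pyGetD d 1 0) (PySem.List.pyGetD r 1 0)
      (rs.map (fun row => PySem.List.pyGetD row 1 0) ++ [PySem.List.pyGetD c0 1 0])
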